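/- GENERATED by farm/mkstatement.py from design/units.tsv (unit `vorbis_validate`) and the Specs of Vorbis/Spec/*.lean — do not edit.
   THE STATEMENT of the proof unit `vorbis_validate`: the function `vorbis_validate` (9 instructions) satisfies its contract,
   given the contracts of its callees. What the names mean: Vorbis/Spec/Basic.lean. The theorem to prove:
   `theorem vorbis_validate_ok : Vorbis.Spec.vorbis_validate.Statement`. -/
import Vorbis.Spec.Alloc
import Vorbis.Spec.LibcMisc
namespace Vorbis.Spec.vorbis_validate
open X86 X86.User Asan

/-- The statement of unit `vorbis_validate`. -/
def Statement : Prop :=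
  ∀ (Lay : Layout) (_hLay : Lay.hi = 0x1000000) (μ : Microarch) (_hμ : UserX.MicroOK μ) (u₀ : State)
    (_hcode : HasCodeNat Lay u₀ Vorbis.L.vorbis_validate.entry Vorbis.Code.code_vorbis_validate.nat Vorbis.L.vorbis_validate.size)
    (_h_memcmp : ∀ (others : List Obj) (frames : List (Nat × FrameLayout)), Calls Lay μ Vorbis.WayInv (Vorbis.conv u₀) Vorbis.L.memcmp.entry (Vorbis.Spec.memcmp.spec others frames)),
    ∀ (others : List Obj) (frames : List (Nat × FrameLayout)), Calls Lay μ Vorbis.WayInv (Vorbis.conv u₀) Vorbis.L.vorbis_validate.entry (Vorbis.Spec.vorbis_validate.spec others frames)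

end Vorbis.Spec.vorbis_validate
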